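-- pv_equiv track=rewrite | github.com/nathanieluriri/oma-s-portfolio-api | api/v1/portfolio.py | _field_path_to_mongo
-- ===== SOURCE A (Python) =====
-- def _path_to_tokens(path: str) -> list:
--     tokens = []
--     buffer = ""
--     idx = 0
--     while idx < len(path):
--         char = path[idx]
--         if char == ".":
--             if buffer:
--                 tokens.append(buffer)
--                 buffer = ""
--             idx += 1
--             continue
--         if char == "[":
--             if buffer:
--                 tokens.append(buffer)
--                 buffer = ""
--             end = path.find("]", idx)
--             if end == -1:
--                 raise ValueError("Invalid field path")
--             index = path[idx + 1 : end]
--             if not index.isdigit():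
--                 raise ValueError("Invalid array index in field path")
--             tokens.append(int(index))
--             idx = end + 1
--             continue
--         buffer += char
--         idx += 1
--     if buffer:
--         tokens.append(buffer)
--     return tokens
--
-- def _field_path_to_mongo(path: str) -> str:
--     tokens = _path_to_tokens(path)
--     mongo_parts = []
--     for token in tokens:
--         if isinstance(token, int):
--             mongo_parts.append(str(token))
--         else:
--             mongo_parts.append(token)
--     return ".".join(mongo_parts)
-- ===== SOURCE B (Python) =====
-- import re
--
-- _TOKEN_RE = re.compile(r'\[([^\]]*)\]|[^.\[]+|\.')
--
-- def _field_path_to_mongo(path: str) -> str: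
--     parts = []
--     pos = 0
--     for m in _TOKEN_RE.finditer(path):
--         if m.start() != pos:
--             raise ValueError("Invalid field path")
--         pos = m.end()
--         content = m.group(1)
--         if content is not None:
--             if not content.isdigit():
--                 raise ValueError("Invalid array index in field path")
--             parts.append(str(int(content)))
--         elif m.group(0) != ".":
--             parts.append(m.group(0))
--     if pos != len(path):
--         raise ValueError("Invalid field path")
--     return ".".join(parts)
-- ===== Notes on version B (the rewrite author's own statement) =====
-- stated objective: faster
-- what changed: Replaces the manual index-walking state machine (char-by-char buffer concatenation, explicit idx jumps) with a compiled regex scan alternating a bracket group, a segment run and a literal dot, iterated with a contiguity cursor.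
import Mathlib
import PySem

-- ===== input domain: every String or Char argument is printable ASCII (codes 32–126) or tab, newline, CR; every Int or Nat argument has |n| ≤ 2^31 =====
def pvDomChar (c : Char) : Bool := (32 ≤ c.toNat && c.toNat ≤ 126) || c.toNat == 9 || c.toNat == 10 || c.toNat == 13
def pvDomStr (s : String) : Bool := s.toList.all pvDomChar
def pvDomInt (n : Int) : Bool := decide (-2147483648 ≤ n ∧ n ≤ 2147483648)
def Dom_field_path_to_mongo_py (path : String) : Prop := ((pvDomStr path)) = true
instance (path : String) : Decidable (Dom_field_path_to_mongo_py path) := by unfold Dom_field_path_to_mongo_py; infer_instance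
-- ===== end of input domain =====

-- B replaces A's manual index-walking state machine with a regex-style scan of three
-- alternatives (bracket group / segment run / literal dot) iterated with a contiguity
-- cursor; it avoids A's char-by-char buffer concatenation (measured faster by the check).
-- Where the Python raises ValueError (an unmatched opening bracket, or an empty or
-- non-digit bracketed index) both ports return "" — those inputs are excluded by
-- Pre_field_path_to_mongo_py; the equality lemma pv_eq_all itself is unconditional.

-- ===== PORT A =====
inductive PvTok
  | i : Int → PvTok
  | s : List Char → PvTok
deriving DecidableEq, Repr

-- path.find("]", idx): offset of the first ']' (A searches from the '[' which is not ']')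
def pvFindRB : List Char → Option Nat
  | [] => none
  | c :: rest => if c = ']' then some 0 else (pvFindRB rest).map (· + 1)

-- 'if buffer: tokens.append(buffer)'
def pvFlush (buffer : List Char) : List PvTok :=
  if buffer = [] then [] else [PvTok.s buffer]

-- the while-loop of _path_to_tokens; none = ValueError
def pvALoop (cs : List Char) (buffer : List Char) (tokens : List PvTok) : Option (List PvTok) :=
  match cs with
  | [] => some (tokens ++ pvFlush buffer)
  | c :: rest =>
    if c = '.' then pvALoop rest [] (tokens ++ pvFlush buffer)
    else if c = '[' then
      match pvFindRB rest with
      | none => none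
      | some j =>
        let index := rest.take j
        if PySem.Chars.strIsdigit index then
          pvALoop (rest.drop (j + 1)) [] ((tokens ++ pvFlush buffer) ++ [PvTok.i ((PySem.Int.ofChars? index).getD 0)])
        else none
    else pvALoop rest (buffer ++ [c]) tokens
termination_by cs.length
decreasing_by
  all_goals simp [List.length_drop]

-- str(token) for int tokens, the string itself otherwise
def pvRender : PvTok → List Char
  | PvTok.i n => PySem.Int.toChars n
  | PvTok.s b => b

def field_path_to_mongo_py (path : String) : String :=
  match pvALoop path.toList [] [] with
  | none => ""
  | some toks => String.ofList (PySem.Chars.join ['.'] (toks.map pvRender))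

-- ===== PORT B =====
-- regex alternative 1: '\[([^\]]*)\]' — scan for the closing ']'
def pvSeekRB : List Char → Option Nat
  | [] => none
  | c :: rest => if c = ']' then some 0 else (pvSeekRB rest).map (· + 1)

-- regex alternative 2 character class: '[^.\[]'
def pvIsSeg (c : Char) : Bool := c ≠ '.' && c ≠ '['

-- finditer over the alternation with the contiguity check folded in:
-- a position where no alternative matches is a gap = ValueError = none
def pvBScan (cs : List Char) : Option (List (List Char)) :=
  match cs with
  | [] => some []
  | c :: rest =>
    if c = '[' then
      match pvSeekRB rest with
      | none => none
      | some j =>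
        let content := rest.take j
        if PySem.Chars.strIsdigit content then
          (pvBScan (rest.drop (j + 1))).map (fun ps => PySem.Int.toChars ((PySem.Int.ofChars? content).getD 0) :: ps)
        else none
    else if c = '.' then pvBScan rest
    else
      (pvBScan (rest.drop (rest.takeWhile pvIsSeg).length)).map
        (fun ps => (c :: rest.takeWhile pvIsSeg) :: ps)
termination_by cs.length
decreasing_by
  all_goals simp [List.length_drop]

def field_path_to_mongo_py_alt (path : String) : String :=
  match pvBScan path.toList with
  | none => ""
  | some parts => String.ofList (PySem.Chars.join ['.'] parts)

-- ===== PRECONDITION & SPEC =====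
-- Pre_ excludes exactly the inputs on which A raises ValueError: an opening bracket with
-- no later closing bracket, or whose content up to the first closing bracket is empty or
-- not all digits.
def Pre_field_path_to_mongo_py (path : String) : Prop :=
  ∀ i < path.toList.length, path.toList.getD i ' ' = '[' →
    ∃ j < path.toList.length, i + 1 < j ∧ path.toList.getD j ' ' = ']' ∧
      ∀ k < j, i < k → (path.toList.getD k ' ').isDigit
instance (path : String) : Decidable (Pre_field_path_to_mongo_py path) := by
  unfold Pre_field_path_to_mongo_py; infer_instance

def pvWitness_field_path_to_mongo_py : String := "user.tags[0].name"

def Spec_field_path_to_mongo_py (path : String) (out : String) : Prop := out = field_path_to_mongo_py_alt path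
instance (path : String) (out : String) : Decidable (Spec_field_path_to_mongo_py path out) := by unfold Spec_field_path_to_mongo_py; infer_instance

-- ===== CLAIM (what is proved, stated in full; the proofs are below) =====
def Claim_equal_field_path_to_mongo_py : Prop := ∀ (path : String), Dom_field_path_to_mongo_py path → Pre_field_path_to_mongo_py path → Spec_field_path_to_mongo_py path (field_path_to_mongo_py path)

-- ===== LEMMAS AND PROOFS =====

theorem pvSeekRB_eq_findRB (cs : List Char) : pvSeekRB cs = pvFindRB cs := by
  induction cs with
  | nil => rfl
  | cons c rest ih => simp [pvSeekRB, pvFindRB, ih]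

-- a pending nonempty segment buffer followed by a non-segment boundary is emitted whole
theorem pvBScan_flush (buffer cs : List Char) (hne : buffer ≠ [])
    (hall : buffer.all pvIsSeg) (hcs : cs.takeWhile pvIsSeg = []) :
    pvBScan (buffer ++ cs) = (pvBScan cs).map (fun ps => buffer :: ps) := by
  match buffer, hne with
  | b :: bs, _ =>
    have hb : pvIsSeg b := by simp [List.all_cons] at hall; exact hall.1
    have hbs : ∀ x ∈ bs, pvIsSeg x := by
      simp [List.all_cons, List.all_eq_true] at hall; exact hall.2
    have hb1 : ¬ b = '[' := by simp [pvIsSeg] at hb; exact hb.2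
    have hb2 : ¬ b = '.' := by simp [pvIsSeg] at hb; exact hb.1
    have htw : (bs ++ cs).takeWhile pvIsSeg = bs := by
      rw [List.takeWhile_append]
      simp [List.takeWhile_eq_self_iff.mpr hbs, hcs]
    have hdrop : (bs ++ cs).drop bs.length = cs := by simp
    rw [List.cons_append]
    simp only [pvBScan, hb1, hb2, if_false, htw, hdrop]

theorem pvMain : ∀ (n : Nat) (cs : List Char), cs.length ≤ n →
    ∀ (buffer : List Char) (tokens : List PvTok), buffer.all pvIsSeg →
    (pvALoop cs buffer tokens).map (·.map pvRender)
      = (pvBScan (buffer ++ cs)).map (fun ps => tokens.map pvRender ++ ps) := by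
  intro n
  induction n with
  | zero =>
    intro cs hlen buffer tokens hall
    have : cs = [] := List.eq_nil_of_length_eq_zero (Nat.le_zero.mp hlen)
    subst this
    by_cases hb : buffer = []
    · subst hb; simp [pvALoop, pvBScan, pvFlush]
    · rw [pvBScan_flush buffer [] hb hall (by simp)]
      simp [pvALoop, pvBScan, pvFlush, hb, pvRender]
  | succ m ih =>
    intro cs hlen buffer tokens hall
    match cs with
    | [] =>
      by_cases hb : buffer = []
      · subst hb; simp [pvALoop, pvBScan, pvFlush]
      · rw [pvBScan_flush buffer [] hb hall (by simp)]
        simp [pvALoop, pvBScan, pvFlush, hb, pvRender]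
    | c :: rest =>
      have hrest : rest.length ≤ m := by simp at hlen; omega
      by_cases hdot : c = '.'
      · subst hdot
        simp only [pvALoop, reduceIte]
        rw [ih rest hrest [] (tokens ++ pvFlush buffer) (by simp)]
        simp only [List.nil_append]
        by_cases hb : buffer = []
        · subst hb
          have h2 : pvBScan ('.' :: rest) = pvBScan rest := by
            simp [pvBScan]
          simp [h2, pvFlush]
        · rw [pvBScan_flush buffer ('.' :: rest) hb hall (by simp [List.takeWhile, pvIsSeg])]
          have h2 : pvBScan ('.' :: rest) = pvBScan rest := by
            simp [pvBScan]
          rw [h2]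
          cases pvBScan rest with
          | none => simp
          | some ps => simp [pvFlush, hb, pvRender]
      · by_cases hbr : c = '['
        · subst hbr
          -- reduce RHS to pvBScan ('[' :: rest) with the buffer flushed in front
          have hred : ∀ (o : Option (List (List Char))), pvBScan ('[' :: rest) = o →
              (pvBScan (buffer ++ '[' :: rest)).map (fun ps => tokens.map pvRender ++ ps)
                = (o.map (fun ps => (pvFlush buffer).map pvRender ++ ps)).map (fun ps => tokens.map pvRender ++ ps) := by
            intro o ho
            by_cases hb : buffer = []
            · subst hb; cases o <;> simp [ho, pvFlush]
            · rw [pvBScan_flush buffer ('[' :: rest) hb hall (by simp [List.takeWhile, pvIsSeg]), ho]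
              cases o with
              | none => simp
              | some ps => simp [pvFlush, hb, pvRender]
          simp only [pvALoop, reduceIte]
          cases hfind : pvFindRB rest with
          | none =>
            have hB : pvBScan ('[' :: rest) = none := by
              conv_lhs => rw [pvBScan.eq_def]
              simp [pvSeekRB_eq_findRB, hfind]
            rw [hred none hB]
            simp
          | some j =>
            have hB : pvBScan ('[' :: rest) =
                (if PySem.Chars.strIsdigit (rest.take j) then
                  (pvBScan (rest.drop (j + 1))).map
                    (fun ps => PySem.Int.toChars ((PySem.Int.ofChars? (rest.take j)).getD 0) :: ps)
                else none) := by
              conv_lhs => rw [pvBScan.eq_def]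
              simp [pvSeekRB_eq_findRB, hfind]
            by_cases hdig : PySem.Chars.strIsdigit (rest.take j)
            · have hdroplen : (rest.drop (j + 1)).length ≤ m := by
                simp [List.length_drop]; omega
              simp only [hdig, if_pos]
              rw [if_neg hdot]
              rw [ih (rest.drop (j + 1)) hdroplen [] _ (by simp)]
              simp only [List.nil_append]
              rw [hred _ hB]
              rw [if_pos hdig]
              cases pvBScan (rest.drop (j + 1)) with
              | none => simp
              | some ps => simp [pvRender]
            · rw [hred _ hB]
              simp [hdig]
        · -- ordinary character: it joins the buffer on the A side and the same list on the B side
          simp only [pvALoop, if_neg hdot, if_neg hbr]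
          rw [ih rest hrest (buffer ++ [c]) tokens
              (by simp [List.all_append, List.all_cons, pvIsSeg, hdot, hbr] at hall ⊢; exact hall)]
          simp

theorem pv_eq_all (path : String) : field_path_to_mongo_py path = field_path_to_mongo_py_alt path := by
  have h := pvMain path.toList.length path.toList (le_refl _) [] [] (by simp)
  simp only [List.nil_append, List.map_nil] at h
  unfold field_path_to_mongo_py field_path_to_mongo_py_alt
  cases ha : pvALoop path.toList [] [] with
  | none =>
    rw [ha] at h
    cases hb : pvBScan path.toList with
    | none => rfl
    | some ps => rw [hb] at h; simp at h
  | some toks =>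
    rw [ha] at h
    cases hb : pvBScan path.toList with
    | none => rw [hb] at h; simp at h
    | some ps =>
      rw [hb] at h
      simp at h
      simp [h]

-- ===== VERDICT (by name: the statement is the Claim_ definition above) =====
theorem field_path_to_mongo_py_spec : Claim_equal_field_path_to_mongo_py := by
  intro path _ _
  unfold Spec_field_path_to_mongo_py
  exact pv_eq_all path
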